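-- pv_equiv track=rewrite | github.com/costa-group/ZK-ARCKIT | to_dzn.py | _classes_string
-- ===== SOURCE A (Python) =====
-- def _classes_string(classes) -> str:
--
--     splits = [1]
--     norm_splits = [1]
--
--     sum = 1
--     norm_sum = 1
--     for key in classes["S1"].keys():
--         sum += len(classes["S1"][key])
--         norm_sum += len(classes["S1"][key]) * (key.count("'") // 2) # ' around each potential norms
--
--         splits.append(sum)
--         norm_splits.append(norm_sum)
--     return f"nNorms = {norm_sum - 1};\n\nclasses = {splits};\nnorm_classes = {norm_splits};\n\n"
-- ===== SOURCE B (Python) =====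
-- def _split_list(items, weight):
--     """Split offsets by recursion on the structure: the splits of (a :: rest)
--     are 1 followed by the splits of rest, each shifted by weight(a)."""
--     if not items:
--         return [1]
--     tail = _split_list(items[1:], weight)
--     w = weight(items[0])
--     return [1] + [w + x for x in tail]
--
--
-- def _classes_string(classes) -> str:
--     items = list(classes["S1"].items())
--     splits = _split_list(items, lambda kv: len(kv[1]))
--     norm_splits = _split_list(items, lambda kv: len(kv[1]) * (kv[0].count("'") // 2))
--     n_norms = sum(len(v) * (k.count("'") // 2) for k, v in items)
--     return f"nNorms = {n_norms};\n\nclasses = {splits};\nnorm_classes = {norm_splits};\n\n"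
-- ===== Notes on version B (the rewrite author's own statement) =====
-- stated objective: alternative
-- what changed: A's fused left-to-right loop with four running accumulators is replaced by a recursion on the list structure: the splits of a nonempty list are 1 followed by the splits of the tail each shifted by the head's weight (no running sums), and nNorms is computed independently as a direct sum.
import Mathlib
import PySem

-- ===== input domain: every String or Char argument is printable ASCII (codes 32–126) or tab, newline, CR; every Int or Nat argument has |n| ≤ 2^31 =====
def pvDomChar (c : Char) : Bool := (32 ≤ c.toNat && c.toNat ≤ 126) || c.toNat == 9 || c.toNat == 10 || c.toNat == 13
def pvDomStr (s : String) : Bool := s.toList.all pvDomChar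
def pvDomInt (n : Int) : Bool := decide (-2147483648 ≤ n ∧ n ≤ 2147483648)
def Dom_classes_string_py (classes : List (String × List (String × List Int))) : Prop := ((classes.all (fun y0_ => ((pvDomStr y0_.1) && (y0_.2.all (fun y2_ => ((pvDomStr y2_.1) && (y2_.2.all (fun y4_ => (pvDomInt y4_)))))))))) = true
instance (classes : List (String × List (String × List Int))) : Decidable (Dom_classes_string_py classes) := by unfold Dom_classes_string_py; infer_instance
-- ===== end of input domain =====

-- B replaces A's fused four-accumulator loop by a recursion on the list structure
-- (splits of a::rest = 1 :: shifted splits of rest) plus a direct sum for nNorms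
-- (objective: alternative decomposition).

-- str(list_of_ints): "[a, b, c]" — Python's repr, used by both f-strings
def pvListRepr (xs : List Int) : String :=
  PySem.Str.join "" ["[", PySem.Str.join ", " (xs.map PySem.Int.toStr), "]"]

-- ===== PORT A =====
-- A iterates 'for key in classes["S1"].keys()' and looks up classes["S1"][key]; for a
-- Python dict (unique keys) that is exactly iterating its items with each pair's own value.
def classes_string_py (classes : List (String × List (String × List Int))) : String :=
  match PySem.Dict.get? (PySem.Dict.mk classes) "S1" with
  | none => ""   -- Python raises KeyError here; excluded by Pre_classes_string_py
  | some inner =>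
    let st := inner.foldl (fun (st : List Int × List Int × Int × Int) kv =>
      let s := st.2.2.1 + (kv.2.length : Int)
      let ns := st.2.2.2 + (kv.2.length : Int) * PySem.Int.floordiv ((PySem.Str.count kv.1 "'" : Int)) 2
      (st.1 ++ [s], st.2.1 ++ [ns], s, ns)) ([1], [1], 1, 1)
    PySem.Str.join "" ["nNorms = ", PySem.Int.toStr (st.2.2.2 - 1), ";\n\nclasses = ",
      pvListRepr st.1, ";\nnorm_classes = ", pvListRepr st.2.1, ";\n\n"]

-- ===== PORT B =====
-- Source B's _split_list: recursion on the structure, suffix result shifted by the head's weight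
def pvSplitList (items : List (String × List Int)) (weight : (String × List Int) → Int) : List Int :=
  match items with
  | [] => [1]
  | a :: rest => 1 :: (pvSplitList rest weight).map (fun x => weight a + x)

def classes_string_py_alt (classes : List (String × List (String × List Int))) : String :=
  match PySem.Dict.get? (PySem.Dict.mk classes) "S1" with
  | none => ""   -- Python B also raises KeyError here; excluded by Pre_classes_string_py
  | some items =>
    let splits := pvSplitList items (fun kv => (kv.2.length : Int))
    let norm_splits := pvSplitList items (fun kv =>
      (kv.2.length : Int) * PySem.Int.floordiv ((PySem.Str.count kv.1 "'" : Int)) 2)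
    let nNorms := (items.map (fun kv =>
      (kv.2.length : Int) * PySem.Int.floordiv ((PySem.Str.count kv.1 "'" : Int)) 2)).sum
    PySem.Str.join "" ["nNorms = ", PySem.Int.toStr nNorms, ";\n\nclasses = ",
      pvListRepr splits, ";\nnorm_classes = ", pvListRepr norm_splits, ";\n\n"]

-- ===== PRECONDITION & SPEC =====
-- A raises KeyError when "S1" is not a key of classes; exactly those inputs are excluded.
def Pre_classes_string_py (classes : List (String × List (String × List Int))) : Prop :=
  "S1" ∈ classes.map Prod.fst
instance (classes : List (String × List (String × List Int))) : Decidable (Pre_classes_string_py classes) := by unfold Pre_classes_string_py; infer_instance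

def pvWitness_classes_string_py : (List (String × List (String × List Int))) := [("S1", [("a'x'", [1, 2]), ("b", [3])])]

def Spec_classes_string_py (classes : List (String × List (String × List Int))) (out : String) : Prop := out = classes_string_py_alt classes
instance (classes : List (String × List (String × List Int))) (out : String) : Decidable (Spec_classes_string_py classes out) := by unfold Spec_classes_string_py; infer_instance

-- ===== CLAIM (what is proved, stated in full; the proofs are below) =====
def Claim_equal_classes_string_py : Prop := ∀ (classes : List (String × List (String × List Int))), Dom_classes_string_py classes → Pre_classes_string_py classes → Spec_classes_string_py classes (classes_string_py classes)

-- ===== LEMMAS AND PROOFS =====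

-- per-pair increments
def pvInc : (String × List Int) → Int := fun kv => (kv.2.length : Int)
def pvNInc : (String × List Int) → Int := fun kv =>
  (kv.2.length : Int) * PySem.Int.floordiv ((PySem.Str.count kv.1 "'" : Int)) 2

-- reference prefix scan: partial sums of xs each added to t
def pvScanGo (xs : List Int) (total : Int) : List Int :=
  match xs with
  | [] => []
  | x :: r => (total + x) :: pvScanGo r (total + x)

-- A's fused loop, characterised: it appends the two scans and ends at the running totals
lemma foldA_eq (l : List (String × List Int)) (sp nsp : List Int) (s ns : Int) :
    l.foldl (fun (st : List Int × List Int × Int × Int) kv =>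
      let s := st.2.2.1 + (kv.2.length : Int)
      let ns := st.2.2.2 + (kv.2.length : Int) * PySem.Int.floordiv ((PySem.Str.count kv.1 "'" : Int)) 2
      (st.1 ++ [s], st.2.1 ++ [ns], s, ns)) (sp, nsp, s, ns)
    = (sp ++ pvScanGo (l.map pvInc) s, nsp ++ pvScanGo (l.map pvNInc) ns,
       s + (l.map pvInc).sum, ns + (l.map pvNInc).sum) := by
  induction l generalizing sp nsp s ns with
  | nil => simp [pvScanGo]
  | cons kv r ih =>
    simp only [List.foldl_cons, List.map_cons, pvScanGo, List.sum_cons]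
    rw [ih]
    simp [pvInc, pvNInc, List.append_assoc]
    constructor <;> ring

-- the scan is shift-equivariant
lemma scanGo_shift (xs : List Int) (c t : Int) :
    (pvScanGo xs t).map (fun x => c + x) = pvScanGo xs (c + t) := by
  induction xs generalizing t with
  | nil => simp [pvScanGo]
  | cons x r ih => simp [pvScanGo, ih, add_assoc]

-- B's structural recursion equals the prefix scan started at 1
lemma splitList_eq (l : List (String × List Int)) (f : (String × List Int) → Int) :
    pvSplitList l f = 1 :: pvScanGo (l.map f) 1 := by
  induction l with
  | nil => simp [pvSplitList, pvScanGo]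
  | cons a r ih =>
    simp only [pvSplitList, List.map_cons, pvScanGo, ih, List.map_cons, scanGo_shift]
    simp [add_comm]

-- ===== VERDICT (by name: the statement is the Claim_ definition above) =====
theorem classes_string_py_spec : Claim_equal_classes_string_py := by
  intro classes _ hpre
  unfold Spec_classes_string_py classes_string_py classes_string_py_alt
  cases h : PySem.Dict.get? (PySem.Dict.mk classes) "S1" with
  | none =>
    exfalso
    rw [PySem.Dict.get?_eq_none_iff_not_mem_keys] at h
    apply h
    simpa [PySem.Dict.keys, Pre_classes_string_py, List.mem_map] using hpre
  | some inner =>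
    simp only [foldA_eq, splitList_eq]
    show PySem.Str.join "" ["nNorms = ", PySem.Int.toStr (1 + (inner.map pvNInc).sum - 1), _, _, _, _, _]
       = _
    simp only [add_sub_cancel_left]
    rfl
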